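-- pv_equiv track=rewrite | github.com/dlsrnjs125/Algorithm | 프로그래머스/0/120863. 다항식 더하기/다항식 더하기.py | solution
-- ===== SOURCE A (Python) =====
-- def solution(polynomial):
--     answer = ''
--     poly = polynomial.replace(' ', '').split('+')
--     numx, num = 0, 0
--
--     for i in poly:
--         if i[-1] == 'x':
--             if i[:-1]:
--                 numx += int(i[:-1])
--             else:
--                 numx += 1
--         else:
--             num += int(i)
--
--     if numx == 0:
--         answer = str(num)
--     elif numx == 1:
--         if num == 0:
--             answer = 'x'
--         else:
--             answer = 'x + ' + str(num)
--     else: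
--         if num == 0:
--             answer = str(numx) + 'x'
--         else:
--             answer = str(numx) + 'x + ' + str(num)
--
--     return answer
-- ===== SOURCE B (Python) =====
-- def solution(polynomial):
--     tokens = polynomial.replace(' ', '').split('+')
--
--     def term_value(t, X):
--         return (int(t[:-1]) if t[:-1] else 1) * X if t[-1] == 'x' else int(t)
--
--     def evaluate(X):
--         return sum(term_value(t, X) for t in tokens)
--
--     num = evaluate(0)
--     numx = evaluate(1) - num
--
--     parts = []
--     if numx == 1:
--         parts.append('x')
--     elif numx != 0:
--         parts.append(str(numx) + 'x')
--     if num != 0 or not parts: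
--         parts.append(str(num))
--     return ' + '.join(parts)
-- ===== Notes on version B (the rewrite author's own statement) =====
-- stated objective: alternative
-- what changed: B recovers the coefficients by interpolation -- it evaluates the linear polynomial at X=0 and X=1 (num = P(0), numx = P(1)-P(0)) instead of accumulating two counters per branch in one pass, and builds the output as a parts list joined with ' + ' instead of A's nested five-way if/elif/else tree.
import Mathlib
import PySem

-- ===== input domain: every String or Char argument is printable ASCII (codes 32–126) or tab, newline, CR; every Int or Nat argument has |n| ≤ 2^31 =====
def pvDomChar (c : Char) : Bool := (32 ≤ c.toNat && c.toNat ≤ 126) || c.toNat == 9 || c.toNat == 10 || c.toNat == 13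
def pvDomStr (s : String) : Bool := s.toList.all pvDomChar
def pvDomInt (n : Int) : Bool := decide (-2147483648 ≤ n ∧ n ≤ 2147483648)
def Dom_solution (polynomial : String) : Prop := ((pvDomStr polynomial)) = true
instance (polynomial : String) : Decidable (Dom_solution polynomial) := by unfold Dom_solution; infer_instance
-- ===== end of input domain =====

-- B recovers the coefficients by interpolation (evaluate at X=0 and X=1: num = P(0),
-- numx = P(1) - P(0)) instead of A's branch-per-term counter accumulation, and joins a
-- parts list instead of A's nested output tree (alternative decomposition, same cost).


-- ===== PORT A =====
-- literal transliteration of A: fold over the '+'-split tokens with the (numx, num) pair,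
-- then the nested if/elif/else building 'answer'.  int(...) is PySem.Int.ofStr?; outside
-- Pre_solution (where Python raises) the .getD 0 default is never the claimed value.
def solution (polynomial : String) : String :=
  let poly := (PySem.Str.split? (PySem.Str.replace polynomial " " "") "+").getD []  -- sep "+" ≠ "", so split? is `some`
  let st : Int × Int := poly.foldl (fun (p : Int × Int) i =>
    if PySem.Str.pyGet? i (-1) = some 'x' then
      if PySem.Str.slice i none (some (-1)) ≠ "" then
        (p.1 + (PySem.Int.ofStr? (PySem.Str.slice i none (some (-1)))).getD 0, p.2)
      else
        (p.1 + 1, p.2)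
    else
      (p.1, p.2 + (PySem.Int.ofStr? i).getD 0)) (0, 0)
  let numx := st.1
  let num := st.2
  if numx = 0 then
    PySem.Int.toStr num
  else if numx = 1 then
    if num = 0 then "x" else "x + " ++ PySem.Int.toStr num
  else
    if num = 0 then PySem.Int.toStr numx ++ "x"
    else PySem.Int.toStr numx ++ "x + " ++ PySem.Int.toStr num

-- ===== PORT B =====
-- Source B's term_value(t, X): the value of one token with X substituted for 'x'
def pvTermValue (t : String) (X : Int) : Int :=
  if PySem.Str.pyGet? t (-1) = some 'x' then
    (if PySem.Str.slice t none (some (-1)) ≠ ""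
     then (PySem.Int.ofStr? (PySem.Str.slice t none (some (-1)))).getD 0 else 1) * X
  else (PySem.Int.ofStr? t).getD 0

def solution_alt (polynomial : String) : String :=
  let tokens := (PySem.Str.split? (PySem.Str.replace polynomial " " "") "+").getD []
  let evaluate : Int → Int := fun X => (tokens.map (fun t => pvTermValue t X)).foldl (· + ·) 0
  let num := evaluate 0
  let numx := evaluate 1 - num
  let parts : List String := []
  let parts := if numx = 1 then parts ++ ["x"]
               else if numx ≠ 0 then parts ++ [PySem.Int.toStr numx ++ "x"]
               else parts
  let parts := if num ≠ 0 ∨ parts = [] then parts ++ [PySem.Int.toStr num] else parts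
  PySem.Str.join " + " parts

-- ===== PRECONDITION & SPEC =====
-- a token is a term A's loop parses without raising: ends in 'x' with an empty or
-- int-parsable coefficient, or is itself int-parsable ('' and junk are excluded)
def pvOkTok (t : String) : Bool :=
  if PySem.Str.pyGet? t (-1) = some 'x' then
    PySem.Str.slice t none (some (-1)) = "" ∨ (PySem.Int.ofStr? (PySem.Str.slice t none (some (-1)))).isSome
  else
    (PySem.Int.ofStr? t).isSome

-- Pre_ excludes exactly the inputs on which Python A raises (IndexError on an empty
-- token, ValueError from int() on a non-integer chunk); A returns on everything else.
def Pre_solution (polynomial : String) : Prop :=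
  ∀ t ∈ (PySem.Str.split? (PySem.Str.replace polynomial " " "") "+").getD [], pvOkTok t = true
instance (polynomial : String) : Decidable (Pre_solution polynomial) := by unfold Pre_solution; infer_instance

def pvWitness_solution : String := "3x + 7 + x + 0"

def Spec_solution (polynomial : String) (out : String) : Prop := out = solution_alt polynomial
instance (polynomial : String) (out : String) : Decidable (Spec_solution polynomial out) := by unfold Spec_solution; infer_instance

-- ===== CLAIM (what is proved, stated in full; the proofs are below) =====
def Claim_equal_solution : Prop := ∀ (polynomial : String), Dom_solution polynomial → Pre_solution polynomial → Spec_solution polynomial (solution polynomial)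

-- ===== LEMMAS AND PROOFS =====

-- proof-only view of a token as its (x-coefficient, constant) pair
def pvTerm (t : String) : Int × Int :=
  if PySem.Str.pyGet? t (-1) = some 'x' then
    (if PySem.Str.slice t none (some (-1)) ≠ ""
     then (PySem.Int.ofStr? (PySem.Str.slice t none (some (-1)))).getD 0 else 1, 0)
  else (0, (PySem.Int.ofStr? t).getD 0)

theorem pv_sum_shift (l : List Int) (a : Int) :
    l.foldl (· + ·) a = a + l.foldl (· + ·) 0 := by
  induction l generalizing a with
  | nil => simp
  | cons x xs ih => simp only [List.foldl_cons]; rw [ih (a + x), ih (0 + x)]; ring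

-- A's loop body adds the token's pair componentwise
theorem pv_step_eq (p : Int × Int) (i : String) :
    (if PySem.Str.pyGet? i (-1) = some 'x' then
      if PySem.Str.slice i none (some (-1)) ≠ "" then
        (p.1 + (PySem.Int.ofStr? (PySem.Str.slice i none (some (-1)))).getD 0, p.2)
      else
        (p.1 + 1, p.2)
    else
      (p.1, p.2 + (PySem.Int.ofStr? i).getD 0))
    = (p.1 + (pvTerm i).1, p.2 + (pvTerm i).2) := by
  unfold pvTerm
  split_ifs <;> simp

-- the componentwise fold equals the pair of the two sums
theorem pv_fold_eq' (ts : List String) (a b : Int) :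
    ts.foldl (fun (p : Int × Int) i => (p.1 + (pvTerm i).1, p.2 + (pvTerm i).2)) (a, b)
    = (a + ((ts.map pvTerm).map Prod.fst).foldl (· + ·) 0,
       b + ((ts.map pvTerm).map Prod.snd).foldl (· + ·) 0) := by
  induction ts generalizing a b with
  | nil => simp
  | cons h tl ih =>
    simp only [List.foldl_cons, List.map_cons]
    rw [ih]
    rw [pv_sum_shift ((tl.map pvTerm).map Prod.fst) (0 + (pvTerm h).1),
        pv_sum_shift ((tl.map pvTerm).map Prod.snd) (0 + (pvTerm h).2)]
    simp only [Prod.mk.injEq]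
    constructor <;> ring

-- A's fold equals the accumulator plus the two coefficient sums
theorem pv_fold_eq (ts : List String) (a b : Int) :
    ts.foldl (fun (p : Int × Int) i =>
      if PySem.Str.pyGet? i (-1) = some 'x' then
        if PySem.Str.slice i none (some (-1)) ≠ "" then
          (p.1 + (PySem.Int.ofStr? (PySem.Str.slice i none (some (-1)))).getD 0, p.2)
        else
          (p.1 + 1, p.2)
      else
        (p.1, p.2 + (PySem.Int.ofStr? i).getD 0)) (a, b)
    = (a + ((ts.map pvTerm).map Prod.fst).foldl (· + ·) 0,
       b + ((ts.map pvTerm).map Prod.snd).foldl (· + ·) 0) := by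
  have hf : (fun (p : Int × Int) i =>
      if PySem.Str.pyGet? i (-1) = some 'x' then
        if PySem.Str.slice i none (some (-1)) ≠ "" then
          (p.1 + (PySem.Int.ofStr? (PySem.Str.slice i none (some (-1)))).getD 0, p.2)
        else
          (p.1 + 1, p.2)
      else
        (p.1, p.2 + (PySem.Int.ofStr? i).getD 0))
      = (fun (p : Int × Int) (i : String) => (p.1 + (pvTerm i).1, p.2 + (pvTerm i).2)) := by
    funext p i; exact pv_step_eq p i
  rw [hf]; exact pv_fold_eq' ts a b

-- B's token values at X = 0 and X = 1 in terms of the token pair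
theorem pv_tv_zero (t : String) : pvTermValue t 0 = (pvTerm t).2 := by
  unfold pvTermValue pvTerm
  split_ifs <;> simp

theorem pv_tv_one (t : String) : pvTermValue t 1 = (pvTerm t).1 + (pvTerm t).2 := by
  unfold pvTermValue pvTerm
  split_ifs <;> simp

-- sum of pointwise sums splits
theorem pv_sum_split (ts : List String) (f g : String → Int) :
    (ts.map (fun t => f t + g t)).foldl (· + ·) 0
    = (ts.map f).foldl (· + ·) 0 + (ts.map g).foldl (· + ·) 0 := by
  induction ts with
  | nil => simp
  | cons h tl ih =>
    simp only [List.map_cons, List.foldl_cons]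
    rw [pv_sum_shift, pv_sum_shift ((tl.map f)), pv_sum_shift ((tl.map g)), ih]
    ring

-- two small join facts about B's final ' + '.join
theorem pv_join_one (s : String) : PySem.Str.join " + " [s] = s := by
  apply String.toList_injective
  simp [PySem.Str.toList_join, PySem.Chars.join_singleton]

theorem pv_join_two (s t : String) : PySem.Str.join " + " [s, t] = s ++ " + " ++ t := by
  apply String.toList_injective
  simp [PySem.Str.toList_join, PySem.Chars.join_cons_cons, PySem.Chars.join_singleton]

theorem solution_spec : Claim_equal_solution := by
  intro polynomial _ _
  unfold Spec_solution solution solution_alt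
  simp only []
  rw [pv_fold_eq]
  simp only [zero_add]
  set ts := (PySem.Str.split? (PySem.Str.replace polynomial " " "") "+").getD []
  have h0 : (ts.map (fun t => pvTermValue t 0)).foldl (· + ·) 0
      = ((ts.map pvTerm).map Prod.snd).foldl (· + ·) 0 := by
    simp only [pv_tv_zero, List.map_map]; rfl
  have h1 : (ts.map (fun t => pvTermValue t 1)).foldl (· + ·) 0
      = ((ts.map pvTerm).map Prod.fst).foldl (· + ·) 0
        + ((ts.map pvTerm).map Prod.snd).foldl (· + ·) 0 := by
    simp only [pv_tv_one]
    rw [pv_sum_split ts (fun t => (pvTerm t).1) (fun t => (pvTerm t).2)]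
    simp [List.map_map]; rfl
  rw [h0, h1]
  set numx := ((ts.map pvTerm).map Prod.fst).foldl (· + ·) 0 with hnx
  set num := ((ts.map pvTerm).map Prod.snd).foldl (· + ·) 0 with hn
  have hsub : numx + num - num = numx := by ring
  rw [hsub]
  by_cases h0' : numx = 0
  · by_cases hz : num = 0 <;> simp [h0', hz, pv_join_one]
  · by_cases h1' : numx = 1
    · by_cases hz : num = 0
      · simp [h1', hz, pv_join_one]
      · simp [h1', hz, pv_join_two]
    · by_cases hz : num = 0
      · simp [h0', h1', hz, pv_join_one]
      · simp [h0', h1', hz, pv_join_two]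
        apply String.toList_injective
        simp
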